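-- pv_equiv track=rewrite | github.com/MMH5429/AETHER-CRYPTO | core/constants.py | _affine_transform
-- ===== SOURCE A (Python) =====
-- def _affine_transform(byte: int) -> int:
--     """Apply the AETHER affine transformation to a byte.
--
--     The affine transform uses:
--     - A circulant matrix defined by the byte 0x1F (binary: 00011111)
--       This means each output bit depends on 5 input bits — good diffusion
--       within the byte.
--     - A constant vector c = 0x03 (binary: 00000011)
--
--     The transform computes: for each output bit i,
--       out[i] = in[i] ^ in[(i+1)%8] ^ in[(i+2)%8] ^ in[(i+3)%8] ^ in[(i+4)%8] ^ c[i]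
--
--     This is a bijection (invertible), which is required so we can decrypt.
--     The constant 0x03 was chosen (instead of AES's 0x63) to eliminate all
--     fixed points (S[x] = x), which would be a cryptographic weakness.
--     """
--     result = 0
--     for i in range(8):
--         # XOR together bits at positions i, i+1, i+2, i+3, i+4 (mod 8)
--         bit = 0
--         for j in range(5):
--             bit ^= (byte >> ((i + j) % 8)) & 1
--         # XOR with the constant bit
--         bit ^= (0x03 >> i) & 1
--         result |= bit << i
--     return result
-- ===== SOURCE B (Python) =====
-- def _affine_transform(byte: int) -> int:
--     """Byte-parallel form: XOR the byte with its rotations by 1..4 (circulant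
--     matrix 0x1F), then XOR the constant 0x03."""
--     v = byte & 0xFF
--
--     def ror(x: int, k: int) -> int:
--         return ((x >> k) | (x << (8 - k))) & 0xFF
--
--     return v ^ ror(v, 1) ^ ror(v, 2) ^ ror(v, 3) ^ ror(v, 4) ^ 0x03
-- ===== Notes on version B (the rewrite author's own statement) =====
-- stated objective: simpler
-- what changed: Replaces the per-output-bit double loop (8 output bits x 5 taps) with a closed-form byte-parallel expression: mask to 8 bits, then XOR the byte with its rotate-rights by 1..4 and the constant 0x03.
import Mathlib
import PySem

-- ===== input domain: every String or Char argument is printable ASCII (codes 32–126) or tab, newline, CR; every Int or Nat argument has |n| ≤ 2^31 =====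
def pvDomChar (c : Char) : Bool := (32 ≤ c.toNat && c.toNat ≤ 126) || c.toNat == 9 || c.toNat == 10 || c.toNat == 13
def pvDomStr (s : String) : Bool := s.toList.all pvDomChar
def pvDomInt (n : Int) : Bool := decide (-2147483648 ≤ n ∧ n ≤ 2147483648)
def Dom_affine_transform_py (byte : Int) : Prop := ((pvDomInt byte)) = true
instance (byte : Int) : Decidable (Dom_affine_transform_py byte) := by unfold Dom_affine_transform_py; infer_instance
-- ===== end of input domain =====

-- B replaces A's per-output-bit double loop with a closed-form byte-parallel
-- XOR of the masked byte and its four rotate-rights, for a simpler expression.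


-- ===== PORT A =====
def affine_transform_py (byte : Int) : Int :=
  (List.range 8).foldl (fun result (i : Nat) =>
    let bit := (List.range 5).foldl (fun bit (j : Nat) =>
      PySem.Int.bxor bit (PySem.Int.band (byte >>> ((i + j) % 8)) 1)) 0
    let bit := PySem.Int.bxor bit (PySem.Int.band ((3 : Int) >>> i) 1)
    PySem.Int.bor result (bit <<< i)) 0

-- ===== PORT B =====
def pvRor8 (x : Int) (k : Nat) : Int :=
  PySem.Int.band (PySem.Int.bor (x >>> k) (x <<< (8 - k))) 255

def affine_transform_py_alt (byte : Int) : Int :=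
  let v := PySem.Int.band byte 255
  PySem.Int.bxor (PySem.Int.bxor (PySem.Int.bxor (PySem.Int.bxor
    (PySem.Int.bxor v (pvRor8 v 1)) (pvRor8 v 2)) (pvRor8 v 3)) (pvRor8 v 4)) 3

-- ===== PRECONDITION & SPEC =====
def Spec_affine_transform_py (byte : Int) (out : Int) : Prop := out = affine_transform_py_alt byte
instance (byte : Int) (out : Int) : Decidable (Spec_affine_transform_py byte out) := by unfold Spec_affine_transform_py; infer_instance

-- ===== CLAIM (what is proved, stated in full; the proofs are below) =====
def Claim_equal_affine_transform_py : Prop := ∀ (byte : Int), Dom_affine_transform_py byte → Spec_affine_transform_py byte (affine_transform_py byte)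

-- ===== LEMMAS AND PROOFS =====

-- Bit k < 8 of an integer only depends on the integer modulo 256.
lemma pv_bit_mod (b : Int) (k : Nat) (hk : k < 8) :
    PySem.Int.band (b >>> k) 1 = PySem.Int.band ((b % 256) >>> k) 1 := by
  rw [PySem.Int.band_one, PySem.Int.band_one,
      Int.shiftRight_eq_div_pow, Int.shiftRight_eq_div_pow]
  rw [show ∀ x : Int, PySem.Int.mod x 2 = x % 2 from
        fun x => PySem.Int.mod_eq_emod_of_pos (by norm_num),
      show ∀ x : Int, PySem.Int.mod x 2 = x % 2 from
        fun x => PySem.Int.mod_eq_emod_of_pos (by norm_num)]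
  interval_cases k <;> omega

-- Masking with 0xFF is reduction modulo 256 (Python two's-complement semantics).
lemma pv_band255 (b : Int) : PySem.Int.band b 255 = b % 256 := by
  unfold PySem.Int.band
  split_ifs with h1 h2 h3
  · have h := Nat.and_two_pow_sub_one_eq_mod b.toNat 8
    have h2 : (2:Nat)^8 - 1 = 255 := by norm_num
    rw [h2] at h
    rw [show (255:Int).toNat = 255 from rfl, h]
    omega
  · exact absurd (by norm_num) h2
  · rw [show (255:Int).toNat = 255 from rfl]
    have h := Nat.and_two_pow_sub_one_eq_mod ((-b - 1).toNat) 8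
    have h2 : (2:Nat)^8 - 1 = 255 := by norm_num
    rw [h2] at h
    rw [Nat.and_comm, h]
    omega
  · exact absurd (by norm_num) h3

-- Port A only reads the byte modulo 256.
lemma pv_A_mod (b : Int) : affine_transform_py b = affine_transform_py (b % 256) := by
  unfold affine_transform_py
  refine congrFun (congrFun (congrArg _ ?_) _) _
  funext result i
  have h : ∀ j : Nat, PySem.Int.band (b >>> ((i + j) % 8)) 1
      = PySem.Int.band ((b % 256) >>> ((i + j) % 8)) 1 :=
    fun j => pv_bit_mod b _ (Nat.mod_lt _ (by norm_num))
  simp only [h]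

-- Port B only reads the byte modulo 256.
lemma pv_B_mod (b : Int) : affine_transform_py_alt b = affine_transform_py_alt (b % 256) := by
  unfold affine_transform_py_alt
  rw [pv_band255, pv_band255, Int.emod_emod_of_dvd b dvd_rfl]

-- The two ports agree on every residue 0..255.
set_option maxRecDepth 16384 in
lemma pv_key : ∀ r : Fin 256,
    affine_transform_py (r.val : Int) = affine_transform_py_alt (r.val : Int) := by decide

-- ===== VERDICT (by name: the statement is the Claim_ definition above) =====
theorem affine_transform_py_spec : Claim_equal_affine_transform_py := by
  intro b _
  unfold Spec_affine_transform_py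
  have h0 : 0 ≤ b % 256 := Int.emod_nonneg b (by norm_num)
  have h1 : b % 256 < 256 := Int.emod_lt_of_pos b (by norm_num)
  have hr : ((b % 256).toNat : Int) = b % 256 := Int.toNat_of_nonneg h0
  rw [pv_A_mod, pv_B_mod, ← hr]
  exact pv_key ⟨(b % 256).toNat, by omega⟩
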